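-- pv_equiv track=rewrite | github.com/Ryeoly/Algorithm_study | Queue, Deque/programmers_Queue_functiondev(L2).py | solution
-- ===== SOURCE A (Python) =====
-- def solution(progresses, speeds):
--     answer = []
--     size = len(progresses)
--     index = 0
--
--     while index < size:
--         for i in range(index, size):
--             progresses[i] = progresses[i] + speeds[i]
--
--         count = 0
--         temp = index
--         for i in progresses[temp:]:
--             if i >= 100:
--                 count += 1
--                 index += 1
--             else:
--                 if count != 0:
--                     answer.append(count)
--                 break
--         if index == size:
--             answer.append(count)
--
--     return answer
-- ===== SOURCE B (Python) =====
-- def solution(progresses, speeds):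
--     # One pass: days-to-finish per task, group by running maximum finish day.
--     # (A mutates `progresses` in place; B does not -- equivalence is about the return value.)
--     answer = []
--     group = 0
--     cur = 0
--     for p, s in zip(progresses, speeds):
--         d = -((p - 100) // s)
--         if d < 1:
--             d = 1
--         if d > cur:
--             if group:
--                 answer.append(group)
--             group = 1
--             cur = d
--         else:
--             group += 1
--     if group:
--         answer.append(group)
--     return answer
-- ===== Notes on version B (the rewrite author's own statement) =====
-- stated objective: faster
-- what changed: A simulates the process day by day, re-incrementing every unfinished task each day; B computes each task's finish day in closed form with ceiling division and emits group sizes in one pass by tracking the running maximum finish day.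
-- outside the precondition, e.g. on solution([200], [0]): A returns [1], B raises ZeroDivisionError
import Mathlib
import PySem

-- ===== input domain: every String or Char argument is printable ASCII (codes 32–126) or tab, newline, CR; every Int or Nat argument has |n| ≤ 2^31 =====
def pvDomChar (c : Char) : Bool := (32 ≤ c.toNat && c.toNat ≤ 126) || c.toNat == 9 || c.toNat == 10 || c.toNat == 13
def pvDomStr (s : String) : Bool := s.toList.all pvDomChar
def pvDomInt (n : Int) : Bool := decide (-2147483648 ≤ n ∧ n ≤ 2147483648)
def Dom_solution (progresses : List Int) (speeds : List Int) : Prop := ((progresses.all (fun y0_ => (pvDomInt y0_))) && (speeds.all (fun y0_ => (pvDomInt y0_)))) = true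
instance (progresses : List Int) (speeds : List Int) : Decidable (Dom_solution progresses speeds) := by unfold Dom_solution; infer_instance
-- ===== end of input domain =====

-- B replaces A's day-by-day simulation by a closed-form finish day per task and a
-- single pass grouping by running maximum finish day.  A mutates `progresses` in
-- place; B does not -- the equivalence proved here is about the return value only.

-- ===== PORT A =====
-- `for i in range(index, size): progresses[i] = progresses[i] + speeds[i]`
def addLoop (ps ss : List Int) (i size : Nat) : List Int :=
  if _h : i < size then addLoop (ps.set i (ps.getD i 0 + ss.getD i 0)) ss (i + 1) size else ps
  termination_by size - i

-- the `for i in progresses[temp:]` scan; returns (count, index, answer)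
def scanA : List Int → Nat → Nat → List Int → Nat × Nat × List Int
  | [], count, index, answer => (count, index, answer)
  | x :: xs, count, index, answer =>
    if x ≥ 100 then scanA xs (count + 1) (index + 1) answer
    else (count, index, if count ≠ 0 then answer ++ [(count : Int)] else answer)

-- the `while index < size` loop; `fuel` is only a totality guard (a bound on the
-- number of days the simulation can take, computed below from the inputs)
def loopA (fuel : Nat) (ps ss : List Int) (size index : Nat) (answer : List Int) : List Int :=
  match fuel with
  | 0 => answer
  | fuel + 1 =>
    if index < size then
      loopA fuel (addLoop ps ss index size) ss size
        (scanA ((addLoop ps ss index size).drop index) 0 index answer).2.1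
        (if (scanA ((addLoop ps ss index size).drop index) 0 index answer).2.1 = size
         then (scanA ((addLoop ps ss index size).drop index) 0 index answer).2.2
                ++ [((scanA ((addLoop ps ss index size).drop index) 0 index answer).1 : Int)]
         else (scanA ((addLoop ps ss index size).drop index) 0 index answer).2.2)
    else answer

def solution (progresses : List Int) (speeds : List Int) : List Int :=
  loopA ((progresses.map (fun p => (100 - p).toNat)).foldl max 0 + 1)
    progresses speeds progresses.length 0 []

-- ===== PORT B =====
def bLoop : List (Int × Int) → List Int → Int → Int → List Int
  | [], answer, group, _cur => if group ≠ 0 then answer ++ [group] else answer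
  | (p, s) :: rest, answer, group, cur =>
    if (if -(PySem.Int.floordiv (p - 100) s) < 1 then 1 else -(PySem.Int.floordiv (p - 100) s)) > cur then
      bLoop rest (if group ≠ 0 then answer ++ [group] else answer) 1
        (if -(PySem.Int.floordiv (p - 100) s) < 1 then 1 else -(PySem.Int.floordiv (p - 100) s))
    else bLoop rest answer (group + 1) cur

def solution_alt (progresses : List Int) (speeds : List Int) : List Int :=
  bLoop (progresses.zip speeds) [] 0 0

-- ===== PRECONDITION & SPEC =====
-- Pre_ excludes inputs where speeds is shorter than progresses (A raises IndexError)
-- and inputs with a non-positive speed among the first len(progresses) speeds (outside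
-- the task's natural domain): there A usually diverges, and where it still returns (a
-- task already ≥ 100 with speed ≤ 0) B's closed-form day formula divides by zero.
def Pre_solution (progresses : List Int) (speeds : List Int) : Prop :=
  progresses.length ≤ speeds.length ∧ ∀ s ∈ speeds.take progresses.length, 1 ≤ s
instance (progresses : List Int) (speeds : List Int) : Decidable (Pre_solution progresses speeds) := by
  unfold Pre_solution; infer_instance

def pvWitness_solution : List Int × List Int := ([93, 30, 55], [1, 30, 5])

def Spec_solution (progresses : List Int) (speeds : List Int) (out : List Int) : Prop := out = solution_alt progresses speeds
instance (progresses : List Int) (speeds : List Int) (out : List Int) : Decidable (Spec_solution progresses speeds out) := by unfold Spec_solution; infer_instance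

-- ===== CLAIM (what is proved, stated in full; the proofs are below) =====
def Claim_equal_solution : Prop := ∀ (progresses : List Int) (speeds : List Int), Dom_solution progresses speeds → Pre_solution progresses speeds → Spec_solution progresses speeds (solution progresses speeds)

-- ===== LEMMAS AND PROOFS =====

-- finish day of a single task (B's `d`)
def Dfun (p s : Int) : Int :=
  if -(PySem.Int.floordiv (p - 100) s) < 1 then 1 else -(PySem.Int.floordiv (p - 100) s)

-- group sizes of a list of finish days by running maximum
def grp : List Int → Int → Int → List Int
  | [], g, _cur => if g ≠ 0 then [g] else []
  | d :: ds, g, cur =>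
    if d > cur then (if g ≠ 0 then [g] else []) ++ grp ds 1 d
    else grp ds (g + 1) cur

theorem one_le_Dfun (p s : Int) : 1 ≤ Dfun p s := by
  unfold Dfun; split <;> omega

theorem Dfun_le_iff (p s k : Int) (hs : 1 ≤ s) (hk : 1 ≤ k) :
    Dfun p s ≤ k ↔ 100 ≤ p + k * s := by
  have h := (PySem.Int.le_floordiv_iff_mul_le (a := p - 100) (b := s) (q := -k) (by omega))
  unfold Dfun
  constructor
  · intro hle
    split at hle <;>
    · have : -k ≤ PySem.Int.floordiv (p - 100) s := by omega
      have := h.mp this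
      nlinarith
  · intro hge
    have : -k * s ≤ p - 100 := by nlinarith
    have := h.mpr this
    split <;> omega

theorem bLoop_eq_grp (pairs : List (Int × Int)) : ∀ (ans : List Int) (g cur : Int),
    bLoop pairs ans g cur = ans ++ grp (pairs.map fun x => Dfun x.1 x.2) g cur := by
  induction pairs with
  | nil => intro ans g cur; simp only [bLoop, grp, List.map_nil]; split <;> simp
  | cons x rest ih =>
    intro ans g cur
    obtain ⟨p, s⟩ := x
    have hD : (if -(PySem.Int.floordiv (p - 100) s) < 1 then (1:Int) else -(PySem.Int.floordiv (p - 100) s)) = Dfun p s := rfl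
    simp only [bLoop, grp, List.map_cons, hD]
    split
    · rw [ih]; split <;> simp
    · rw [ih]

theorem grp_all_le (ds : List Int) : ∀ (es : List Int) (g cur : Int),
    (∀ d ∈ ds, d ≤ cur) → grp (ds ++ es) g cur = grp es (g + ds.length) cur := by
  induction ds with
  | nil => intro es g cur _; simp
  | cons d ds ih =>
    intro es g cur h
    have hd : ¬ d > cur := by have := h d (by simp); omega
    simp only [List.cons_append, grp, if_neg hd]
    rw [ih es (g + 1) cur (fun x hx => h x (by simp [hx]))]
    have hc : g + 1 + (ds.length : Int) = g + (((d :: ds).length : Nat) : Int) := by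
      simp; omega
    rw [hc]

theorem grp_pop (d cur cur' g : Int) (ds : List Int) (h : d > cur) (h' : d > cur') :
    grp (d :: ds) g cur = (if g ≠ 0 then [g] else []) ++ grp (d :: ds) 0 cur' := by
  simp only [grp, if_pos h, if_pos h']
  simp

theorem scanA_all (l : List Int) : ∀ (c i : Nat) (a : List Int), (∀ x ∈ l, 100 ≤ x) →
    scanA l c i a = (c + l.length, i + l.length, a) := by
  induction l with
  | nil => intro c i a _; simp [scanA]
  | cons x xs ih =>
    intro c i a h
    have hx : x ≥ 100 := h x (by simp)
    simp only [scanA, if_pos hx]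
    rw [ih _ _ _ (fun y hy => h y (by simp [hy]))]
    simp only [List.length_cons, Prod.mk.injEq]
    exact ⟨by omega, by omega, by trivial⟩

theorem scanA_break (t : List Int) (y : Int) (r : List Int) (hy : y < 100) :
    ∀ (c i : Nat) (a : List Int), (∀ x ∈ t, 100 ≤ x) →
    scanA (t ++ y :: r) c i a =
      (c + t.length, i + t.length, if c + t.length ≠ 0 then a ++ [((c + t.length : Nat) : Int)] else a) := by
  induction t with
  | nil =>
    intro c i a _
    have : ¬ y ≥ 100 := by omega
    simp [scanA, this]
  | cons x xs ih =>
    intro c i a ht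
    have hx : x ≥ 100 := ht x (by simp)
    simp only [List.cons_append, scanA, if_pos hx]
    rw [ih _ _ _ (fun z hz => ht z (by simp [hz]))]
    have h1 : c + 1 + xs.length = c + (xs.length + 1) := by omega
    have h2 : i + 1 + xs.length = i + (xs.length + 1) := by omega
    simp [h1, h2]

theorem addLoop_eq (i size : Nat) (ps ss : List Int)
    (hps : ps.length = size) (hss : size ≤ ss.length) (hi : i ≤ size) :
    addLoop ps ss i size = ps.take i ++ (ps.drop i).zipWith (· + ·) (ss.drop i) := by
  by_cases h : i < size
  · rw [addLoop, dif_pos h]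
    have hips : i < ps.length := by omega
    have hiss : i < ss.length := by omega
    rw [addLoop_eq (i + 1) size _ ss (by simp [hps]) hss (by omega)]
    have e1 : (ps.set i (ps.getD i 0 + ss.getD i 0)).take (i + 1)
        = ps.take i ++ [ps.getD i 0 + ss.getD i 0] := by
      rw [List.take_succ]
      rw [List.take_set_of_le (by omega)]
      simp [List.getElem?_set_self' (l := ps), hips]
    have e2 : (ps.set i (ps.getD i 0 + ss.getD i 0)).drop (i + 1) = ps.drop (i + 1) := by
      rw [List.drop_set]; simp
    rw [e1, e2]
    have e3 : ps.drop i = ps.getD i 0 :: ps.drop (i + 1) := by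
      rw [List.getD_eq_getElem _ _ hips]
      exact (List.drop_eq_getElem_cons hips)
    have e4 : ss.drop i = ss.getD i 0 :: ss.drop (i + 1) := by
      rw [List.getD_eq_getElem _ _ hiss]
      exact (List.drop_eq_getElem_cons hiss)
    rw [e3, e4]
    simp
  · rw [addLoop, dif_neg h]
    have hd : ps.drop i = [] := List.drop_eq_nil_of_le (by omega)
    have htk : ps.take i = ps := List.take_of_length_le (by omega)
    rw [hd, htk]
    simp
termination_by size - i

theorem zipWith_take_right {α : Type} (f : α → α → α) (l : List α) : ∀ (m : List α),
    List.zipWith f l m = List.zipWith f l (m.take l.length) := by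
  induction l with
  | nil => intro m; simp
  | cons x xs ih =>
    intro m
    cases m with
    | nil => simp
    | cons y ys =>
      simp only [List.zipWith_cons_cons, List.length_cons, List.take_succ_cons]
      exact congrArg _ (ih ys)

theorem zipWith_map_snd (T : List (Int × Int)) (f : Int × Int → Int) :
    List.zipWith (· + ·) (T.map f) (T.map Prod.snd) = T.map (fun x => f x + x.2) := by
  induction T with
  | nil => simp
  | cons x xs ih => simp [List.zipWith, ih]

theorem take_drop_snd (T : List (Int × Int)) (ss : List Int) (index : Nat) (c : Nat)
    (h : (ss.drop index).take T.length = T.map Prod.snd) :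
    (ss.drop (index + c)).take (T.drop c).length = (T.drop c).map Prod.snd := by
  have h2 := congrArg (List.drop c) h
  rw [List.drop_take, List.drop_drop] at h2
  simpa using h2

theorem foldl_max_le (l : List Nat) : ∀ (a : Nat), a ≤ l.foldl max a := by
  induction l with
  | nil => intro a; simp
  | cons x xs ih => intro a; exact le_trans (Nat.le_max_left a x) (ih (max a x))

theorem le_foldl_max (l : List Nat) : ∀ (a x : Nat), x ∈ l → x ≤ l.foldl max a := by
  induction l with
  | nil => intro a x hx; simp at hx
  | cons y ys ih =>
    intro a x hx
    simp only [List.mem_cons] at hx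
    rcases hx with rfl | hx
    · exact le_trans (Nat.le_max_right a x) (foldl_max_le ys _)
    · exact ih _ _ hx

theorem Dfun_le_bound (p s : Int) (hs : 1 ≤ s) : Dfun p s ≤ ((100 - p).toNat : Int) + 1 := by
  by_cases hp : p ≥ 100
  · have h0 : ((100 - p).toNat : Int) = 0 := by omega
    rw [h0]
    rw [show ((0 : Int)) + 1 = 1 by norm_num]
    rw [Dfun_le_iff p s 1 hs (by omega)]
    nlinarith
  · have ht : ((100 - p).toNat : Int) = 100 - p := by omega
    have h1 : (1 : Int) ≤ ((100 - p).toNat : Int) + 1 := by omega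
    rw [Dfun_le_iff p s _ hs h1, ht]
    nlinarith

theorem mem_zip_snd (P : List Int) : ∀ (S : List Int) (x : Int × Int), x ∈ P.zip S →
    x.2 ∈ S.take P.length := by
  induction P with
  | nil => intro S x h; simp [List.zip] at h
  | cons p ps ih =>
    intro S x h
    cases S with
    | nil => simp [List.zip] at h
    | cons s ssl =>
      simp only [List.zip_cons_cons, List.mem_cons] at h
      rcases h with rfl | h
      · simp
      · simp only [List.length_cons, List.take_succ_cons, List.mem_cons]
        exact Or.inr (ih _ _ h)

theorem map_snd_zip' (P : List Int) : ∀ (S : List Int), P.length ≤ S.length →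
    (S.take P.length) = (P.zip S).map Prod.snd := by
  induction P with
  | nil => intro S _; simp
  | cons p ps ih =>
    intro S h
    cases S with
    | nil => simp at h
    | cons s ssl =>
      simp only [List.length_cons, List.take_succ_cons, List.zip_cons_cons, List.map_cons]
      exact congrArg _ (ih ssl (by simpa using h))

theorem map_fst_zip' (P : List Int) : ∀ (S : List Int), P.length ≤ S.length →
    P = (P.zip S).map Prod.fst := by
  induction P with
  | nil => intro S _; simp
  | cons p ps ih =>
    intro S h
    cases S with
    | nil => simp at h
    | cons s ssl =>
      simp only [List.zip_cons_cons, List.map_cons]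
      exact congrArg _ (ih ssl (by simpa using h))

-- main invariant lemma: the day-by-day loop produces the group sizes by running max
theorem loopA_inv (ss : List Int) (size : Nat) (h9 : size ≤ ss.length) (fuel : Nat) :
    ∀ (T : List (Int × Int)) (ps : List Int) (index : Nat) (answer : List Int) (k : Int),
    (∀ x ∈ T, 1 ≤ x.2) →
    0 ≤ k →
    ps.length = size →
    index + T.length = size →
    ps.drop index = T.map (fun x => x.1 + k * x.2) →
    (∀ x, T.head? = some x → k < Dfun x.1 x.2) →
    (∀ x ∈ T, Dfun x.1 x.2 ≤ k + fuel) →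
    (ss.drop index).take T.length = T.map Prod.snd →
    loopA fuel ps ss size index answer = answer ++ grp (T.map fun x => Dfun x.1 x.2) 0 k := by
  induction fuel with
  | zero =>
    intro T ps index answer k h1 h2 h3 h4 h5 h6 h7 h8
    cases T with
    | nil => simp only [loopA, List.map_nil, grp]; simp
    | cons x xs =>
      exfalso
      have := h6 x (by simp)
      have := h7 x (by simp)
      omega
  | succ fuel ih =>
    intro T ps index answer k h1 h2 h3 h4 h5 h6 h7 h8
    cases T with
    | nil =>
      have hn : ¬ index < size := by simp at h4; omega
      simp only [loopA, if_neg hn, List.map_nil, grp]; simp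
    | cons x0 T0 =>
      have hlt : index < size := by simp at h4; omega
      rw [loopA, if_pos hlt]
      -- the day's increment
      have hadd : addLoop ps ss index size = ps.take index ++ (ps.drop index).zipWith (· + ·) (ss.drop index) :=
        addLoop_eq index size ps ss h3 h9 (by omega)
      have hlen_drop : (ps.drop index).length = (x0 :: T0).length := by
        rw [List.length_drop, h3]; simp at h4 ⊢; omega
      have hdrop' : (addLoop ps ss index size).drop index = (x0 :: T0).map (fun x => x.1 + (k + 1) * x.2) := by
        rw [hadd, List.drop_append_of_le_length (by simp; omega)]
        rw [List.drop_take, Nat.sub_self, List.take_zero, List.nil_append]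
        rw [zipWith_take_right, h5, List.length_map, h8, zipWith_map_snd]
        apply List.map_congr_left
        intro a _
        ring
      have hlen' : (addLoop ps ss index size).length = size := by
        rw [hadd]
        have hz : (List.zipWith (· + ·) (ps.drop index) (ss.drop index)).length = size - index := by
          rw [List.length_zipWith, List.length_drop, List.length_drop, h3]
          omega
      -- split T at the first task not finished on day k+1
        simp [hz]; omega
      have hs1 : ∀ x ∈ (x0 :: T0), (1:Int) ≤ x.2 := h1
      rcases htr : (x0 :: T0).takeWhile (fun x => decide (Dfun x.1 x.2 ≤ k + 1)) with _ | ⟨z0, t0⟩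
      all_goals rcases hrr : (x0 :: T0).dropWhile (fun x => decide (Dfun x.1 x.2 ≤ k + 1)) with _ | ⟨y0, r0⟩
      -- case t = [], r = [] : impossible (T nonempty)
      · exfalso
        have := List.takeWhile_append_dropWhile (p := fun x => decide (Dfun x.1 x.2 ≤ k + 1)) (l := x0 :: T0)
        rw [htr, hrr] at this
        simp at this
      -- case t = [], r = y0 :: r0 : nothing finishes today
      · have hyx : y0 = x0 ∧ r0 = T0 := by
          have := List.takeWhile_append_dropWhile (p := fun x => decide (Dfun x.1 x.2 ≤ k + 1)) (l := x0 :: T0)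
          rw [htr, hrr] at this
          simp at this
          exact ⟨this.1, this.2⟩
        obtain ⟨rfl, rfl⟩ := hyx
        have hy0q : ¬ (Dfun y0.1 y0.2 ≤ k + 1) := by
          have h := List.head?_dropWhile_not (p := fun x => decide (Dfun x.1 x.2 ≤ k + 1)) (l := y0 :: r0)
          rw [hrr] at h
          simp at h
          omega
        have hy0lt : y0.1 + (k + 1) * y0.2 < 100 := by
          by_contra hcon
          push_neg at hcon
          have := (Dfun_le_iff y0.1 y0.2 (k + 1) (hs1 y0 (by simp)) (by omega)).mpr hcon
          omega
        rw [hdrop']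
        rw [show ((y0 :: r0).map (fun x => x.1 + (k + 1) * x.2)) = [] ++ ((y0.1 + (k+1) * y0.2) :: r0.map (fun x => x.1 + (k + 1) * x.2)) from by simp]
        rw [scanA_break _ _ _ hy0lt _ _ _ (by simp)]
        simp only [List.length_nil, Nat.add_zero, ne_eq, not_true_eq_false, ite_false,
          if_neg (by omega : ¬ index = size)]
        rw [ih (y0 :: r0) (addLoop ps ss index size) index answer (k + 1)
          hs1 (by omega) hlen' (by simpa using h4) hdrop'
          (by intro x hx; simp at hx; subst hx; omega)
          (by intro x hx; have := h7 x hx; omega)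
          h8]
        congr 1
        simp only [List.map_cons]
        have hd0 : k < Dfun y0.1 y0.2 := h6 y0 (by simp)
        rw [grp_pop _ _ _ _ _ (by omega) (by omega : Dfun y0.1 y0.2 > k)]
        simp
      -- case t = z0 :: t0, r = [] : every remaining task finishes today
      · have htT : z0 :: t0 = x0 :: T0 := by
          have := List.takeWhile_append_dropWhile (p := fun x => decide (Dfun x.1 x.2 ≤ k + 1)) (l := x0 :: T0)
          rw [htr, hrr] at this
          simpa using this
        have hall : ∀ x ∈ (x0 :: T0), Dfun x.1 x.2 ≤ k + 1 := by
          intro x hx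
          rw [← htT] at hx
          have := List.mem_takeWhile_imp (htr ▸ hx)
          simpa using this
        have ht100 : ∀ y ∈ (x0 :: T0).map (fun x => x.1 + (k + 1) * x.2), (100:Int) ≤ y := by
          intro y hy
          rw [List.mem_map] at hy
          obtain ⟨x, hx, rfl⟩ := hy
          exact (Dfun_le_iff x.1 x.2 (k + 1) (hs1 x hx) (by omega)).mp (hall x hx)
        rw [hdrop', scanA_all _ _ _ _ ht100]
        simp only [List.length_map, List.length_cons, Nat.zero_add]
        have hieq : index + (T0.length + 1) = size := by simpa using h4
        rw [if_pos (by omega : index + (T0.length + 1) = size)]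
        rw [ih ([] : List (Int × Int)) (addLoop ps ss index size) (index + (T0.length + 1))
          (answer ++ [((T0.length + 1 : Nat) : Int)]) (k + 1)
          (by simp) (by omega) hlen' (by simpa using hieq) (by rw [show index + (T0.length + 1) = size from hieq]; simp [hlen'])
          (by simp) (by simp)
          (by rw [show index + (T0.length + 1) = size from hieq]; simp)]
        simp only [List.map_nil, grp, ne_eq, not_true_eq_false, ite_false]
        rw [List.append_assoc]
        congr 1
        simp only [List.append_nil]
        -- grp of the whole group = [|T|]
        have hd0 : k < Dfun x0.1 x0.2 := h6 x0 (by simp)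
        have hd0' : Dfun x0.1 x0.2 ≤ k + 1 := hall x0 (by simp)
        simp only [List.map_cons, grp, if_pos (by omega : Dfun x0.1 x0.2 > k)]
        simp only [ne_eq, OfNat.zero_ne_ofNat, not_false_eq_true]
        rw [show (T0.map fun x => Dfun x.1 x.2) = (T0.map fun x => Dfun x.1 x.2) ++ ([] : List Int) from by simp]
        rw [grp_all_le _ _ _ _ (by
          intro d hd
          rw [List.mem_map] at hd
          obtain ⟨x, hx, rfl⟩ := hd
          have := hall x (by simp [hx])
          omega)]
        simp only [grp, List.length_map, ne_eq]
        rw [if_neg (by simp)]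
        rw [if_pos (by push_cast; omega)]
        simp
        push_cast
        omega
      -- case t = z0 :: t0, r = y0 :: r0 : group t finishes today, r remains
      · have hTtr : (z0 :: t0) ++ (y0 :: r0) = x0 :: T0 := by
          have := List.takeWhile_append_dropWhile (p := fun x => decide (Dfun x.1 x.2 ≤ k + 1)) (l := x0 :: T0)
          rw [htr, hrr] at this
          exact this
        have hzx : z0 = x0 := by injection hTtr
        have htmem : ∀ x ∈ (z0 :: t0), x ∈ (x0 :: T0) := by
          intro x hx; rw [← hTtr]; exact List.mem_append_left _ hx
        have hrmem : ∀ x ∈ (y0 :: r0), x ∈ (x0 :: T0) := by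
          intro x hx; rw [← hTtr]; exact List.mem_append_right _ hx
        have htall : ∀ x ∈ (z0 :: t0), Dfun x.1 x.2 ≤ k + 1 := by
          intro x hx
          have := List.mem_takeWhile_imp (htr ▸ hx)
          simpa using this
        have hy0q : ¬ (Dfun y0.1 y0.2 ≤ k + 1) := by
          have h := List.head?_dropWhile_not (p := fun x => decide (Dfun x.1 x.2 ≤ k + 1)) (l := x0 :: T0)
          rw [hrr] at h
          simp at h
          omega
        have hy0lt : y0.1 + (k + 1) * y0.2 < 100 := by
          by_contra hcon
          push_neg at hcon
          have := (Dfun_le_iff y0.1 y0.2 (k + 1) (hs1 y0 (hrmem y0 (by simp))) (by omega)).mpr hcon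
          omega
        have ht100 : ∀ y ∈ (z0 :: t0).map (fun x => x.1 + (k + 1) * x.2), (100:Int) ≤ y := by
          intro y hy
          rw [List.mem_map] at hy
          obtain ⟨x, hx, rfl⟩ := hy
          exact (Dfun_le_iff x.1 x.2 (k + 1) (hs1 x (htmem x hx)) (by omega)).mp (htall x hx)
        have hmapsplit : (x0 :: T0).map (fun x => x.1 + (k + 1) * x.2)
            = (z0 :: t0).map (fun x => x.1 + (k + 1) * x.2) ++ ((y0.1 + (k+1) * y0.2) :: r0.map (fun x => x.1 + (k + 1) * x.2)) := by
          rw [show (y0.1 + (k + 1) * y0.2) :: r0.map (fun x => x.1 + (k + 1) * x.2)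
                = (y0 :: r0).map (fun x => x.1 + (k + 1) * x.2) from rfl]
          rw [← List.map_append, hTtr]
        rw [hdrop', hmapsplit, scanA_break _ _ _ hy0lt _ _ _ ht100]
        simp only [List.length_map, List.length_cons, Nat.zero_add]
        have hlen_tr : (t0.length + 1) + (r0.length + 1) = T0.length + 1 := by
          have := congrArg List.length hTtr
          simp at this
          omega
        have h4' : index + (T0.length + 1) = size := by simpa using h4
        rw [if_neg (by omega : ¬ index + (t0.length + 1) = size)]
        rw [if_pos (by omega : (t0.length + 1 : Nat) ≠ 0)]
        have hdroplen : ((z0 :: t0).map (fun x : Int × Int => x.1 + (k + 1) * x.2)).length = t0.length + 1 := by simp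
        rw [ih (y0 :: r0) (addLoop ps ss index size) (index + (t0.length + 1))
          (answer ++ [((t0.length + 1 : Nat) : Int)]) (k + 1)
          (fun x hx => hs1 x (hrmem x hx)) (by omega) hlen'
          (by simp; omega)
          (by rw [← List.drop_drop, hdrop']
              rw [show ((x0 :: T0).map fun x => x.1 + (k+1) * x.2)
                  = ((z0 :: t0).map fun x => x.1 + (k+1) * x.2) ++ ((y0 :: r0).map fun x => x.1 + (k+1) * x.2) from by
                rw [← List.map_append, hTtr]]
              rw [show t0.length + 1 = ((z0 :: t0).map fun x : Int × Int => x.1 + (k+1) * x.2).length from by simp]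
              rw [List.drop_left])
          (by intro x hx; simp at hx; subst hx; omega)
          (by intro x hx; have := h7 x (hrmem x hx); omega)
          (by have h2 := take_drop_snd (x0 :: T0) ss index (t0.length + 1) h8
              rw [← hTtr] at h2
              rw [show ((z0 :: t0) ++ y0 :: r0).drop (t0.length + 1)
                  = y0 :: r0 from by
                rw [show t0.length + 1 = (z0 :: t0).length from by simp]
                exact List.drop_left]
                at h2
              exact h2)]
        rw [List.append_assoc]
        congr 1
        -- now the pure grp computation
        have hd0 : k < Dfun x0.1 x0.2 := h6 x0 (by simp)
        have hd0' : Dfun x0.1 x0.2 ≤ k + 1 := htall z0 (by simp) |>.trans_eq' (by rw [hzx])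
        have hd0eq : Dfun x0.1 x0.2 = k + 1 := by omega
        have hTmap : ((x0 :: T0).map fun x => Dfun x.1 x.2)
            = Dfun x0.1 x0.2 :: ((t0.map fun x => Dfun x.1 x.2) ++ ((y0 :: r0).map fun x => Dfun x.1 x.2)) := by
          rw [← List.map_append]
          rw [show t0 ++ y0 :: r0 = T0 from by injection hTtr]
          simp
        rw [hTmap]
        simp only [grp, if_pos (by omega : Dfun x0.1 x0.2 > k), ne_eq, not_true_eq_false, ite_false]
        rw [grp_all_le (t0.map fun x => Dfun x.1 x.2) _ 1 (Dfun x0.1 x0.2) (by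
          intro d hd
          rw [List.mem_map] at hd
          obtain ⟨x, hx, rfl⟩ := hd
          have := htall x (by simp [hx])
          omega)]
        simp only [List.map_cons, grp, if_pos (by omega : Dfun y0.1 y0.2 > Dfun x0.1 x0.2),
          if_pos (by omega : Dfun y0.1 y0.2 > k + 1)]
        rw [if_pos (by push_cast; simp; omega : (1 + (↑(t0.map fun x => Dfun x.1 x.2).length) : Int) ≠ 0)]
        rw [if_neg (by simp : ¬ ((0:Int) ≠ 0))]
        simp only [List.length_map, List.nil_append]
        congr 2
        push_cast
        omega

-- ===== VERDICT (by name: the statement is the Claim_ definition above) =====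
theorem solution_spec : Claim_equal_solution := by
  intro P S _hdom hpre
  obtain ⟨hlen, hsp⟩ := hpre
  unfold Spec_solution solution solution_alt
  rw [bLoop_eq_grp]
  have hs1 : ∀ x ∈ P.zip S, (1:Int) ≤ x.2 := by
    intro x hx
    exact hsp x.2 (mem_zip_snd P S x hx)
  have hzlen : (P.zip S).length = P.length := by
    rw [List.length_zip]; omega
  rw [loopA_inv S P.length hlen _ (P.zip S) P 0 [] 0
    hs1 (by omega) rfl (by simpa using hzlen)
    (by have h := map_fst_zip' P S hlen
        simp only [List.drop_zero]
        rw [show (P.zip S).map (fun x => x.1 + 0 * x.2) = (P.zip S).map Prod.fst from by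
          apply List.map_congr_left; intro a _; ring]
        exact h)
    (by intro x _; have := one_le_Dfun x.1 x.2; omega)
    (by intro x hx
        obtain ⟨a, b⟩ := x
        have hfst : a ∈ P := (List.of_mem_zip hx).1
        have hbound := Dfun_le_bound a b (hs1 (a, b) hx)
        have hmem : (100 - a).toNat ∈ P.map (fun p => (100 - p).toNat) := List.mem_map_of_mem hfst
        have := le_foldl_max _ 0 _ hmem
        push_cast
        omega)
    (by simpa [hzlen] using (map_snd_zip' P S hlen))]
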